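-- pv_equiv track=rewrite | github.com/ucd-dnp/ConTexto | utils/helper.py | is_in_text
-- ===== SOURCE A (Python) =====
-- def is_in_text(text, lista=[], lista_2 = []):
--     isin = False
--     count = 0
--     for string in lista:
--         if all(i in text for i in string.split('|')):
--             if string not in lista_2:
--                 return True
--             else:
--                 count+=1
--                 if count > 1:
--                     return True
--     return isin
-- ===== SOURCE B (Python) =====
-- def is_in_text(text, lista=[], lista_2=[]):
--     # Partition the patterns by lista_2 membership BEFORE touching the text,
--     # then decide with two independent staged tests: any match outside lista_2,
--     # or at least two matches inside lista_2 (order of checks is irrelevant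
--     # because the condition is existential/counting, not positional).
--     def matches(s):
--         return all(p in text for p in s.split('|'))
--     excluded = set(lista_2)
--     outside = [s for s in lista if s not in excluded]
--     inside = [s for s in lista if s in excluded]
--     if any(map(matches, outside)):
--         return True
--     return sum(map(matches, inside)) >= 2
-- ===== Notes on version B (the rewrite author's own statement) =====
-- stated objective: alternative
-- what changed: Instead of A's single ordered pass with a mutable counter and early returns, B first partitions the patterns by membership in set(lista_2) before any text check, then applies two independent staged tests: an existential any-match over the outside partition, and a counted at-least-two-matches over the inside partition.
import Mathlib
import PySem

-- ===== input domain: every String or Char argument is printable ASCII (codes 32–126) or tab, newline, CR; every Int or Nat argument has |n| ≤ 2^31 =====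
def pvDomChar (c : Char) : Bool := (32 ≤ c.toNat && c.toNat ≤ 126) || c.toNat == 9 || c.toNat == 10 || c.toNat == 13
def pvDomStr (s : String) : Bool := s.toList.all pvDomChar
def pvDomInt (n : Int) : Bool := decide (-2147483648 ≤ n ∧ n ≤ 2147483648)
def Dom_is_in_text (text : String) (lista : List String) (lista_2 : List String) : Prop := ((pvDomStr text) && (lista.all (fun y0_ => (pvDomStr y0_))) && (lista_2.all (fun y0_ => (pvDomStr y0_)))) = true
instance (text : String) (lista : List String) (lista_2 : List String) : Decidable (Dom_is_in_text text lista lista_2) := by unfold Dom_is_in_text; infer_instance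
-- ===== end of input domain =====

-- B replaces A's single ordered pass with counter and early returns by: partition by lista_2
-- membership first, then an existential test on the outside partition and a counting test on the inside one.

-- ===== PORT A =====
-- A's loop, step for step: flag isin (stays False), running count, early returns inside the branches.
def is_in_text_go (text : String) (lista_2 : List String) : List String → Nat → Bool
  | [], _ => false    -- return isin (isin is never reassigned)
  | s :: rest, count =>
    if (PySem.Chars.splitOn s.toList "|".toList).all (fun i => PySem.Chars.isIn i text.toList) then
      if !(lista_2.contains s) then true
      else
        if count + 1 > 1 then true else is_in_text_go text lista_2 rest (count + 1)
    else is_in_text_go text lista_2 rest count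

def is_in_text (text : String) (lista : List String) (lista_2 : List String) : Bool :=
  is_in_text_go text lista_2 lista 0

-- ===== PORT B =====
def is_in_text_alt (text : String) (lista : List String) (lista_2 : List String) : Bool :=
  let matchesP := fun (s : String) => (PySem.Chars.splitOn s.toList "|".toList).all (fun p => PySem.Chars.isIn p text.toList)
  let excluded := PySem.Set.ofList lista_2
  let outside := lista.filter (fun s => !(PySem.Set.contains excluded s))
  let inside := lista.filter (fun s => PySem.Set.contains excluded s)
  if outside.any matchesP then true
  else decide (2 ≤ inside.countP matchesP)

-- ===== PRECONDITION & SPEC =====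
def Spec_is_in_text (text : String) (lista : List String) (lista_2 : List String) (out : Bool) : Prop := out = is_in_text_alt text lista lista_2
instance (text : String) (lista : List String) (lista_2 : List String) (out : Bool) : Decidable (Spec_is_in_text text lista lista_2 out) := by unfold Spec_is_in_text; infer_instance

-- ===== CLAIM (what is proved, stated in full; the proofs are below) =====
def Claim_equal_is_in_text : Prop := ∀ (text : String) (lista : List String) (lista_2 : List String), Dom_is_in_text text lista lista_2 → Spec_is_in_text text lista lista_2 (is_in_text text lista lista_2)

-- ===== LEMMAS AND PROOFS =====

-- loop invariant: A's loop from state `count = c` (c ≤ 1, as in every reachable state) decides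
-- "some remaining match is absent from lista_2, or c plus the remaining present matchesP reaches 2"
theorem is_in_text_go_iff (text : String) (lista_2 : List String) (l : List String) (c : Nat) (hc : c ≤ 1) :
    (is_in_text_go text lista_2 l c = true ↔
      (1 ≤ (l.filter (fun s => !(lista_2.contains s))).countP (fun s => (PySem.Chars.splitOn s.toList "|".toList).all (fun p => PySem.Chars.isIn p text.toList)) ∨
       2 ≤ c + (l.filter (fun s => lista_2.contains s)).countP (fun s => (PySem.Chars.splitOn s.toList "|".toList).all (fun p => PySem.Chars.isIn p text.toList)))) := by
  induction l generalizing c with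
  | nil =>
    simp only [is_in_text_go, List.filter_nil, List.countP_nil, Nat.add_zero, Bool.false_eq_true,
      false_iff]
    omega
  | cons s rest ih =>
    by_cases hcn : lista_2.contains s = true
    · simp only [is_in_text_go, List.filter_cons, hcn, Bool.not_true, Bool.false_eq_true,
        if_false, if_true, List.countP_cons]
      by_cases hm : (PySem.Chars.splitOn s.toList "|".toList).all (fun i => PySem.Chars.isIn i text.toList) = true
      · rw [if_pos hm]
        simp only [hm, if_true]
        by_cases h1 : c + 1 > 1
        · rw [if_pos h1]
          simp only [true_iff]
          omega
        · rw [if_neg h1, ih (c + 1) (by omega)]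
          omega
      · rw [if_neg hm]
        simp only [hm, Bool.false_eq_true, if_false, Nat.add_zero, ih c hc]
    · simp only [is_in_text_go, List.filter_cons, hcn, Bool.not_false, Bool.false_eq_true,
        if_false, if_true, List.countP_cons]
      by_cases hm : (PySem.Chars.splitOn s.toList "|".toList).all (fun i => PySem.Chars.isIn i text.toList) = true
      · rw [if_pos hm]
        simp only [hm, if_true, true_iff]
        omega
      · rw [if_neg hm]
        simp only [hm, Bool.false_eq_true, if_false, Nat.add_zero, ih c hc]

-- ===== VERDICT (by name: the statement is the Claim_ definition above) =====
theorem is_in_text_spec : Claim_equal_is_in_text := by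
  intro text lista lista_2 _
  unfold Spec_is_in_text is_in_text is_in_text_alt
  have hset : ∀ s : String, PySem.Set.contains (PySem.Set.ofList lista_2) s = lista_2.contains s := by
    intro s
    rw [Bool.eq_iff_iff]
    simp [PySem.Set.contains, PySem.Set.mem_ofList]
  simp only [hset]
  rw [Bool.eq_iff_iff, is_in_text_go_iff text lista_2 lista 0 (by omega)]
  simp only [Bool.if_true_left, Bool.or_eq_true, decide_eq_true_iff, Nat.zero_add,
    List.any_eq_true, ← List.countP_pos_iff]
  omega
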